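-- pv_equiv track=rewrite | github.com/Furkan-Ozdemir/simple_query_system | sql.py | write_to_dictionary
-- ===== SOURCE A (Python) =====
-- def write_to_dictionary(filtered_by_params_dict, column_name):
--     dictionary_To_add = {}
--     for key, value in filtered_by_params_dict.items():
--         if (
--             "NAME" in column_name
--             and "LASTNAME" in column_name
--             and "EMAIL" in column_name
--             and "GRADE" in column_name
--         ):
--             dictionary_To_add[key] = [value[0], value[1], value[2], value[3]]
--
--         elif (
--             "NAME" in column_name
--             and "LASTNAME" in column_name
--             and "EMAIL" in column_name
--         ):
--             dictionary_To_add[key] = [value[0], value[1], value[2]]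
--
--         elif (
--             "NAME" in column_name
--             and "LASTNAME" in column_name
--             and "GRADE" in column_name
--         ):
--             dictionary_To_add[key] = [value[0], value[1], value[3]]
--
--         elif (
--             "NAME" in column_name and "EMAIL" in column_name and "GRADE" in column_name
--         ):
--             dictionary_To_add[key] = [value[0], value[2], value[3]]
--
--         elif (
--             "LASTNAME" in column_name
--             and "EMAIL" in column_name
--             and "GRADE" in column_name
--         ):
--             dictionary_To_add[key] = [value[1], value[2], value[3]]
--
--         elif "NAME" in column_name and "LASTNAME" in column_name:
--             dictionary_To_add[key] = [value[0], value[1]]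
--
--         elif "NAME" in column_name and "EMAIL" in column_name:
--             dictionary_To_add[key] = [value[0], value[2]]
--
--         elif "NAME" in column_name and "GRADE" in column_name:
--             dictionary_To_add[key] = [value[0], value[3]]
--
--         elif "LASTNAME" in column_name and "EMAIL" in column_name:
--             dictionary_To_add[key] = [value[1], value[2]]
--
--         elif "LASTNAME" in column_name and "GRADE" in column_name:
--             dictionary_To_add[key] = [value[1], value[3]]
--
--         elif "EMAIL" in column_name and "GRADE" in column_name:
--             dictionary_To_add[key] = [value[2], value[3]]
--
--         elif "NAME" in column_name:
--             dictionary_To_add[key] = [value[0]]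
--
--         elif "LASTNAME" in column_name:
--             dictionary_To_add[key] = [value[1]]
--
--         elif "EMAIL" in column_name:
--             dictionary_To_add[key] = [value[2]]
--
--         elif "GRADE" in column_name:
--             dictionary_To_add[key] = [value[3]]
--     return dictionary_To_add
-- ===== SOURCE B (Python) =====
-- def write_to_dictionary(filtered_by_params_dict, column_name):
--     sel = [i for i, c in enumerate(("NAME", "LASTNAME", "EMAIL", "GRADE")) if c in column_name]
--     dictionary_To_add = {}
--     if sel:
--         for key, value in filtered_by_params_dict.items():
--             dictionary_To_add[key] = [value[i] for i in sel]
--     return dictionary_To_add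
-- ===== Notes on version B (the rewrite author's own statement) =====
-- stated objective: simpler
-- what changed: Replaces the 15-branch substring ladder re-evaluated for every row with a selection list of column indices computed once before the loop, then one loop projecting each row through those indices (skipping all rows when no column matches); Pre_ excludes only inputs where both programs raise IndexError on short rows.
import Mathlib
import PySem

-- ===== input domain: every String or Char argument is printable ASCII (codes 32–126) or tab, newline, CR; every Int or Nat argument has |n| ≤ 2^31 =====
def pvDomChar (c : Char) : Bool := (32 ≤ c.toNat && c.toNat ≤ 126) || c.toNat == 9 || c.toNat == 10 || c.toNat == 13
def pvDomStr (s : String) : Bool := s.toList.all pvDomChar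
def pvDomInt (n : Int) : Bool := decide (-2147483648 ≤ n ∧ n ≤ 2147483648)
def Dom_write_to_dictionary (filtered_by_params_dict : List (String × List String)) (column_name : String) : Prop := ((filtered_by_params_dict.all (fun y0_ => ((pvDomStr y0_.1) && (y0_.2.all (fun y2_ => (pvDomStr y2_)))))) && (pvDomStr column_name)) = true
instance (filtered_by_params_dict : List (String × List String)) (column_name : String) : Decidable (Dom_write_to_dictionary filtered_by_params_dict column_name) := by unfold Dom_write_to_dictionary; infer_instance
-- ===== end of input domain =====

-- B replaces A's 15-branch substring ladder with a column-index selection list computed once; objective: simpler.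


-- ===== PORT A =====
-- literal ladder; value[i] is pyGetD (safe under Pre_, which excludes the IndexError inputs)
def write_to_dictionary (filtered_by_params_dict : List (String × List String)) (column_name : String) : List (String × List String) :=
  (filtered_by_params_dict.foldl (fun d kv =>
    let key := kv.1
    let v := kv.2
    let g : Int → String := fun i => PySem.List.pyGetD v i ""
    let n := PySem.Str.isIn "NAME" column_name
    let ln := PySem.Str.isIn "LASTNAME" column_name
    let e := PySem.Str.isIn "EMAIL" column_name
    let gr := PySem.Str.isIn "GRADE" column_name
    if n && ln && e && gr then d.insert key [g 0, g 1, g 2, g 3]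
    else if n && ln && e then d.insert key [g 0, g 1, g 2]
    else if n && ln && gr then d.insert key [g 0, g 1, g 3]
    else if n && e && gr then d.insert key [g 0, g 2, g 3]
    else if ln && e && gr then d.insert key [g 1, g 2, g 3]
    else if n && ln then d.insert key [g 0, g 1]
    else if n && e then d.insert key [g 0, g 2]
    else if n && gr then d.insert key [g 0, g 3]
    else if ln && e then d.insert key [g 1, g 2]
    else if ln && gr then d.insert key [g 1, g 3]
    else if e && gr then d.insert key [g 2, g 3]
    else if n then d.insert key [g 0]
    else if ln then d.insert key [g 1]
    else if e then d.insert key [g 2]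
    else if gr then d.insert key [g 3]
    else d) PySem.Dict.empty).items

-- ===== PORT B =====
-- sel = [i for i, c in enumerate(("NAME","LASTNAME","EMAIL","GRADE")) if c in column_name]
def wtd_sel (column_name : String) : List Int :=
  ((PySem.List.enumerate ["NAME", "LASTNAME", "EMAIL", "GRADE"]).filter
      (fun p => PySem.Str.isIn p.2 column_name)).map (·.1)

def write_to_dictionary_alt (filtered_by_params_dict : List (String × List String)) (column_name : String) : List (String × List String) :=
  let sel := wtd_sel column_name
  if sel.isEmpty then (PySem.Dict.empty (κ := String) (ν := List String)).items
  else
    (filtered_by_params_dict.foldl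
      (fun d kv => d.insert kv.1 (sel.map (fun i => PySem.List.pyGetD kv.2 i "")))
      PySem.Dict.empty).items

-- ===== PRECONDITION & SPEC =====
-- Pre_ excludes exactly the inputs on which Python A raises IndexError: a row shorter than the
-- largest column index any matched column name selects.
def Pre_write_to_dictionary (filtered_by_params_dict : List (String × List String)) (column_name : String) : Prop :=
  (PySem.Str.isIn "NAME" column_name = true → ∀ kv ∈ filtered_by_params_dict, 1 ≤ kv.2.length) ∧
  (PySem.Str.isIn "LASTNAME" column_name = true → ∀ kv ∈ filtered_by_params_dict, 2 ≤ kv.2.length) ∧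
  (PySem.Str.isIn "EMAIL" column_name = true → ∀ kv ∈ filtered_by_params_dict, 3 ≤ kv.2.length) ∧
  (PySem.Str.isIn "GRADE" column_name = true → ∀ kv ∈ filtered_by_params_dict, 4 ≤ kv.2.length)
instance (filtered_by_params_dict : List (String × List String)) (column_name : String) : Decidable (Pre_write_to_dictionary filtered_by_params_dict column_name) := by unfold Pre_write_to_dictionary; infer_instance

def pvWitness_write_to_dictionary : (List (String × List String)) × String :=
  ([("1", ["ann", "lee", "a@b.c", "90"]), ("2", ["bob", "fox", "b@b.c", "70"])], "NAME,GRADE")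

def Spec_write_to_dictionary (filtered_by_params_dict : List (String × List String)) (column_name : String) (out : List (String × List String)) : Prop := out = write_to_dictionary_alt filtered_by_params_dict column_name
instance (filtered_by_params_dict : List (String × List String)) (column_name : String) (out : List (String × List String)) : Decidable (Spec_write_to_dictionary filtered_by_params_dict column_name out) := by unfold Spec_write_to_dictionary; infer_instance

-- ===== CLAIM (what is proved, stated in full; the proofs are below) =====
def Claim_equal_write_to_dictionary : Prop := ∀ (filtered_by_params_dict : List (String × List String)) (column_name : String), Dom_write_to_dictionary filtered_by_params_dict column_name → Pre_write_to_dictionary filtered_by_params_dict column_name → Spec_write_to_dictionary filtered_by_params_dict column_name (write_to_dictionary filtered_by_params_dict column_name)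

-- ===== LEMMAS AND PROOFS =====

-- ===== VERDICT (by name: the statement is the Claim_ definition above) =====
theorem write_to_dictionary_spec : Claim_equal_write_to_dictionary := by
  intro l col _ _
  unfold Spec_write_to_dictionary write_to_dictionary write_to_dictionary_alt wtd_sel
  cases hn : PySem.Chars.isIn ['N','A','M','E'] col.toList <;>
    cases hl : PySem.Chars.isIn ['L','A','S','T','N','A','M','E'] col.toList <;>
      cases he : PySem.Chars.isIn ['E','M','A','I','L'] col.toList <;>
        cases hg : PySem.Chars.isIn ['G','R','A','D','E'] col.toList <;>
          simp [hn, hl, he, hg, PySem.List.enumerate_cons, PySem.List.enumerate_nil,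
            List.filter, List.map]
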